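-- pv_equiv track=rewrite | github.com/007krcs/aria-ai | agents/academic_solver.py | _genotype_ratio
-- ===== SOURCE A (Python) =====
-- def _genotype_ratio(combos: list) -> str:
--     from collections import Counter
--     # Normalise (sort letters so Aa = Aa, aA = Aa)
--     normalised = []
--     for c in combos:
--         if len(c) == 2:
--             normalised.append("".join(sorted(c, key=lambda x: (x.lower(), x.islower()))))
--         else:
--             normalised.append(c)
--     counts = Counter(normalised)
--     return " : ".join(f"{v} {k}" for k, v in sorted(counts.items()))
-- ===== SOURCE B (Python) =====
-- def _genotype_ratio(combos: list) -> str: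
--     def norm(c):
--         if len(c) == 2:
--             a, b = c
--             if (b.lower(), b.islower()) < (a.lower(), a.islower()):
--                 return b + a
--             return a + b
--         return c
--
--     remaining = [norm(c) for c in combos]
--     parts = []
--     while remaining:
--         m = min(remaining)
--         parts.append(f"{remaining.count(m)} {m}")
--         remaining = [x for x in remaining if x != m]
--     return " : ".join(parts)
-- ===== Notes on version B (the rewrite author's own statement) =====
-- stated objective: alternative
-- what changed: B drops both the Counter hash table and the final sort: it normalizes each pair by a single swap comparison instead of sorting two letters, then repeatedly extracts the minimum key from the remaining list, counts and removes all its occurrences, emitting parts directly in ascending order (selection-style, no Counter, no sorted, no groupby).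
import Mathlib
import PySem

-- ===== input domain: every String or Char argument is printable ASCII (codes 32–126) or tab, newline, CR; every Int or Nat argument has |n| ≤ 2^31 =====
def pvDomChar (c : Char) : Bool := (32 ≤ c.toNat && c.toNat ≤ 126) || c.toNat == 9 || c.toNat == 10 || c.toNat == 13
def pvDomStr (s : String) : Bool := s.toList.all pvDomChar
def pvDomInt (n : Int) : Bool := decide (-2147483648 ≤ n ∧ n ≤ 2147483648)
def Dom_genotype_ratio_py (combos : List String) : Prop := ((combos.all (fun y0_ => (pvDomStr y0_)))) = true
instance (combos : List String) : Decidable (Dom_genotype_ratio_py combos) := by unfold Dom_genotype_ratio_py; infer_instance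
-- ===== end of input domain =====

-- B drops the Counter hash table and the final sort: it normalises a pair by one swap
-- comparison instead of sorting two letters, then repeatedly extracts the minimum key,
-- counts and removes its occurrences, emitting parts already in ascending order;
-- objective: alternative decomposition, same result.

-- ===== PORT A =====
-- A normalises a 2-char combo with Python's sorted(c, key=lambda x: (x.lower(), x.islower())):
-- one-char strings are ported as Char, x.lower() is PySem.Chars.lowerChar, x.islower() is
-- PySem.Chars.islower (exact on ASCII), the tuple key is PySem.List.sorted2's two keys.
def pvNormA (c : String) : String :=
  if PySem.Str.len c == 2 then
    String.ofList (PySem.List.sorted2 c.toList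
      (fun x => PySem.Chars.lowerChar x) (fun x => PySem.Chars.islower x))
  else c

def genotype_ratio_py (combos : List String) : String :=
  let normalised := combos.foldl (fun acc c => acc ++ [pvNormA c]) []
  let counts := PySem.Dict.counter normalised
  PySem.Str.join " : "
    ((PySem.List.sorted2 counts.items (fun kv => kv.1) (fun kv => kv.2)).map
      (fun kv => PySem.Int.toStr kv.2 ++ " " ++ kv.1))

-- ===== PORT B =====
-- B's norm: unpack the two chars and swap them on one tuple comparison
-- '(b.lower(), b.islower()) < (a.lower(), a.islower())' (Python tuple < is lexicographic,
-- False < True on bools), ported as the explicit lexicographic condition.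
def pvNormB (c : String) : String :=
  if PySem.Str.len c == 2 then
    match c.toList with
    | [a, b] =>
        if PySem.Chars.lowerChar b < PySem.Chars.lowerChar a ∨
           (PySem.Chars.lowerChar b = PySem.Chars.lowerChar a ∧
             PySem.Chars.islower b < PySem.Chars.islower a)
        then String.ofList [b, a] else String.ofList [a, b]
    | l => String.ofList l  -- unreachable: len c == 2 forces a two-element list
  else c

-- the while loop: m = min(remaining); emit f"{remaining.count(m)} {m}"; drop all copies of m
def pvParts (l : List String) : List String :=
  match h : PySem.List.min? l (fun x => x) with
  | none => []
  | some m =>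
      (PySem.Int.toStr ((PySem.List.count l m : Nat) : Int) ++ " " ++ m)
        :: pvParts (l.filter (fun x => !(x == m)))
  termination_by l.length
  decreasing_by
    have hlt := (List.length_filter_lt_length_iff_exists
        (p := fun (x : {x // x ∈ l}) => !((x : String) == m)) (l := l.attach)).mpr
      ⟨⟨m, PySem.List.min?_mem h⟩, List.mem_attach l _, by simp⟩
    simpa using hlt

def genotype_ratio_py_alt (combos : List String) : String :=
  let remaining := combos.map (fun c => pvNormB c)
  PySem.Str.join " : " (pvParts remaining)

-- ===== PRECONDITION & SPEC =====
def Spec_genotype_ratio_py (combos : List String) (out : String) : Prop := out = genotype_ratio_py_alt combos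
instance (combos : List String) (out : String) : Decidable (Spec_genotype_ratio_py combos out) := by unfold Spec_genotype_ratio_py; infer_instance

-- ===== CLAIM (what is proved, stated in full; the proofs are below) =====
def Claim_equal_genotype_ratio_py : Prop := ∀ (combos : List String), Dom_genotype_ratio_py combos → Spec_genotype_ratio_py combos (genotype_ratio_py combos)

-- ===== LEMMAS AND PROOFS =====

-- the two normalisations agree: sorting a 2-element list is one swap comparison
theorem pvNorm_eq (c : String) : pvNormB c = pvNormA c := by
  unfold pvNormA pvNormB
  by_cases hlen : PySem.Str.len c == 2
  · simp only [hlen, if_true]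
    have h2 : c.toList.length = 2 := by
      simp only [PySem.Str.len, beq_iff_eq] at hlen
      exact_mod_cast hlen
    obtain ⟨a, b, hab⟩ := List.length_eq_two.mp h2
    rw [hab]
    simp only [PySem.List.sorted2, PySem.List.insertBy, List.foldl]
    by_cases h1 : PySem.Chars.lowerChar b < PySem.Chars.lowerChar a
    · have h1' : ¬ PySem.Chars.lowerChar a < PySem.Chars.lowerChar b := lt_asymm h1
      simp [h1, h1']
    · by_cases h1' : PySem.Chars.lowerChar a < PySem.Chars.lowerChar b
      · have hne : PySem.Chars.lowerChar b ≠ PySem.Chars.lowerChar a := ne_of_gt h1'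
        simp [h1, h1', hne]
      · have heq : PySem.Chars.lowerChar b = PySem.Chars.lowerChar a :=
          le_antisymm (not_lt.mp h1') (not_lt.mp h1)
        by_cases h3 : PySem.Chars.islower b < PySem.Chars.islower a
        · simp [heq, h3]
        · simp [heq, h3]
  · simp only [beq_iff_eq, PySem.Str.len] at hlen
    simp at hlen
    simp [hlen]

-- selection loop = emit every distinct key in ascending order with its count
theorem pv_parts_eq : ∀ (n : List String) (L : List String), L.Pairwise (· < ·) →
    (∀ x, x ∈ L ↔ x ∈ n) →
    pvParts n = L.map (fun k => PySem.Int.toStr ((n.count k : Nat) : Int) ++ " " ++ k) := by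
  intro n
  induction n using pvParts.induct with
  | case1 n h =>
      intro L hL hm
      have hn : n = [] := (PySem.List.min?_eq_none_iff n _).mp h
      subst hn
      have hLnil : L = [] := List.eq_nil_iff_forall_not_mem.mpr
        (fun x hx => by simpa using (hm x).mp hx)
      subst hLnil
      rw [pvParts, h]
      simp
  | case2 n m h ih =>
      intro L hL hm
      have hmem : m ∈ n := PySem.List.min?_mem h
      have hmin : ∀ y ∈ n, m ≤ y := fun y hy => PySem.List.min?_isMin h y hy
      cases L with
      | nil => exact absurd ((hm m).mpr hmem) (by simp)
      | cons hd L' =>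
          have hhd : hd = m := by
            have hhdn : hd ∈ n := (hm hd).mp List.mem_cons_self
            have h1 : m ≤ hd := hmin hd hhdn
            rcases List.mem_cons.mp ((hm m).mpr hmem) with rfl | hmL'
            · rfl
            · exact absurd ((List.pairwise_cons.mp hL).1 m hmL') (not_lt.mpr h1)
          subst hhd
          have hL' : L'.Pairwise (· < ·) := (List.pairwise_cons.mp hL).2
          have hhead : ∀ y ∈ L', hd < y := (List.pairwise_cons.mp hL).1
          have hm' : ∀ x, x ∈ L' ↔ x ∈ n.filter (fun x => !(x == hd)) := by
            intro x
            rw [List.mem_filter]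
            constructor
            · intro hx
              have hne : x ≠ hd := fun he => lt_irrefl hd (he ▸ hhead x hx)
              exact ⟨(hm x).mp (List.mem_cons_of_mem _ hx), by simpa using hne⟩
            · rintro ⟨hxn, hxne⟩
              have hne : x ≠ hd := by simpa using hxne
              rcases List.mem_cons.mp ((hm x).mpr hxn) with rfl | hx
              · exact absurd rfl hne
              · exact hx
          have hfil : (List.filter (fun x_1 : {x // x ∈ n} =>
              match x_1 with | ⟨x_2, _⟩ => !x_2 == hd) n.attach).unattach
              = n.filter (fun x => !(x == hd)) := by
            rw [List.unattach_filter (g := fun x => !(x == hd)) (hf := fun x _ => rfl)]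
            simp
          rw [hfil] at ih
          rw [pvParts]
          split
          case _ h2 => rw [h] at h2; cases h2
          case _ m h2 =>
          rw [h] at h2
          injection h2 with h2
          subst h2
          rw [ih L' hL' hm']
          simp only [List.map_cons, List.cons.injEq]
          refine ⟨rfl, List.map_congr_left (fun k hk => ?_)⟩
          have hne : (k == hd) = false := by
            refine beq_eq_false_iff_ne.mpr ?_
            intro he
            have hlt := hhead k hk
            rw [he] at hlt
            exact lt_irrefl _ hlt
          rw [List.count_filter (by simp [hne])]

theorem pv_insertBy_congr {α : Type} (b b' : α → α → Bool) (x : α) (acc : List α)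
    (h : ∀ y ∈ acc, b x y = b' x y) :
    PySem.List.insertBy b x acc = PySem.List.insertBy b' x acc := by
  induction acc with
  | nil => rfl
  | cons y ys ih =>
      have hy := h y (by simp)
      simp only [PySem.List.insertBy, hy]
      split
      · rfl
      · simp only [List.cons.injEq, true_and]
        exact ih (fun z hz => h z (by simp [hz]))

theorem pv_foldl_insertBy_congr {α : Type} (b b' : α → α → Bool) (l : List α) (acc : List α)
    (h : ∀ x ∈ l, ∀ y, (y ∈ acc ∨ y ∈ l) → b x y = b' x y) :
    l.foldl (fun a x => PySem.List.insertBy b x a) acc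
      = l.foldl (fun a x => PySem.List.insertBy b' x a) acc := by
  induction l generalizing acc with
  | nil => rfl
  | cons x t ih =>
      simp only [List.foldl_cons]
      rw [pv_insertBy_congr b b' x acc (fun y hy => h x (by simp) y (Or.inl hy))]
      exact ih _ (fun z hz y hy => h z (by simp [hz]) y (by
        rcases hy with hy | hy
        · rw [PySem.List.mem_insertBy] at hy
          rcases hy with rfl | hy
          · exact Or.inr (by simp)
          · exact Or.inl hy
        · exact Or.inr (by simp [hy])))

-- keys distinct on xs ⇒ the (fst, snd) tuple sort is the fst sort
theorem pv_sorted2_eq_sorted (xs : List (String × Int))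
    (hinj : ∀ a ∈ xs, ∀ c ∈ xs, a.1 = c.1 → a = c) :
    PySem.List.sorted2 xs (fun kv => kv.1) (fun kv => kv.2)
      = PySem.List.sorted xs (fun kv => kv.1) := by
  simp only [PySem.List.sorted2, PySem.List.sorted, if_neg (by simp : ¬ (false = true))]
  apply pv_foldl_insertBy_congr
  intro a ha y hy
  have hy' : y ∈ xs := by
    rcases hy with hy | hy
    · simp at hy
    · exact hy
  by_cases h1 : a.1 < y.1
  · simp [h1]
  · by_cases h2 : y.1 < a.1
    · simp [h1, h2]
    · have heq : a.1 = y.1 := le_antisymm (not_lt.mp h2) (not_lt.mp h1)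
      have := hinj a ha y hy' heq
      subst this
      simp

-- ===== VERDICT (by name: the statement is the Claim_ definition above) =====
theorem genotype_ratio_py_spec : Claim_equal_genotype_ratio_py := by
  intro combos _
  unfold Spec_genotype_ratio_py genotype_ratio_py genotype_ratio_py_alt
  simp only [PySem.List.foldl_append_singleton_eq_map, List.nil_append]
  rw [show combos.map (fun c => pvNormB c) = combos.map (fun c => pvNormA c) from
    List.map_congr_left (fun c _ => pvNorm_eq c)]
  set n := combos.map (fun c => pvNormA c) with hn
  set K := PySem.List.sorted (PySem.Set.ofList n) (fun k => k) with hK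
  -- A's dict items
  have hitems : (PySem.Dict.counter n).items
      = (PySem.Set.ofList n).map (fun k => (k, ((n.count k : Nat) : Int))) := by
    rw [PySem.Dict.items_eq_map_keys _ (PySem.Dict.nodup_keys_counter n) 0,
        PySem.Dict.keys_counter]
    exact List.map_congr_left (fun k _ => by rw [PySem.Dict.getD_counter])
  have hinj : ∀ a ∈ (PySem.Dict.counter n).items, ∀ c ∈ (PySem.Dict.counter n).items,
      a.1 = c.1 → a = c := by
    rw [hitems]
    intro a ha c hc h1
    obtain ⟨ka, -, rfl⟩ := List.mem_map.mp ha
    obtain ⟨kc, -, rfl⟩ := List.mem_map.mp hc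
    simp only at h1
    subst h1
    rfl
  have hsortedA : PySem.List.sorted (PySem.Dict.counter n).items (fun kv => kv.1)
      = K.map (fun k => (k, ((n.count k : Nat) : Int))) := by
    apply PySem.List.sorted_eq_of_perm_of_pairwise_lt
    · rw [hitems]
      exact List.Perm.map _ (PySem.List.sorted_perm _ _ _)
    · exact List.pairwise_map.mpr (PySem.List.sorted_ofList_pairwise_lt n)
  -- B's selection loop over the same distinct keys
  have hmemK : ∀ x, x ∈ K ↔ x ∈ n := by
    intro x
    rw [hK, PySem.List.mem_sorted, PySem.Set.mem_ofList]
  have hparts : pvParts n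
      = K.map (fun k => PySem.Int.toStr ((n.count k : Nat) : Int) ++ " " ++ k) :=
    pv_parts_eq n K (PySem.List.sorted_ofList_pairwise_lt n) hmemK
  rw [pv_sorted2_eq_sorted _ hinj, hsortedA, hparts]
  simp only [List.map_map]
  rfl
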